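-- pv_equiv track=rewrite | github.com/Etoile04/ontofuel | src/ontofuel/extraction/merger.py | _merge_properties
-- ===== SOURCE A (Python) =====
-- def _merge_properties(properties: list[dict]) -> list[dict]:
--     """Merge properties, combining values for the same property name."""
--     if not properties:
--         return []
--
--     grouped: dict[str, list[dict]] = {}
--     for prop in properties:
--         name = prop.get("name", "unknown")
--         if name not in grouped:
--             grouped[name] = []
--         grouped[name].append(prop)
--
--     result = []
--     for name, props in grouped.items():
--         if len(props) == 1:
--             result.append(props[0])
--         else:
--             # Keep unique values
--             values_seen: set[str] = set()
--             for p in props: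
--                 val_key = f"{p.get('value', '')}_{p.get('unit', '')}"
--                 if val_key not in values_seen:
--                     values_seen.add(val_key)
--                     result.append(p)
--
--     return result
-- ===== SOURCE B (Python) =====
-- def _merge_properties(properties: list[dict]) -> list[dict]:
--     """Merge properties: one pass builds a nested dict keeping the first
--     prop per (name, value_unit) key; flattening preserves group order."""
--     grouped: dict[str, dict[str, dict]] = {}
--     for prop in properties:
--         name = prop.get("name", "unknown")
--         val_key = f"{prop.get('value', '')}_{prop.get('unit', '')}"
--         grouped.setdefault(name, {}).setdefault(val_key, prop)
--     return [p for inner in grouped.values() for p in inner.values()]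
-- ===== Notes on version B (the rewrite author's own statement) =====
-- stated objective: simpler
-- what changed: Replaces A's two-phase pipeline (group into lists per name, then a second pass deduplicating each group with a seen-set) by a single pass over the input that builds a nested dict name -> val_key -> first prop via setdefault, flattened at the end.
import Mathlib
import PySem

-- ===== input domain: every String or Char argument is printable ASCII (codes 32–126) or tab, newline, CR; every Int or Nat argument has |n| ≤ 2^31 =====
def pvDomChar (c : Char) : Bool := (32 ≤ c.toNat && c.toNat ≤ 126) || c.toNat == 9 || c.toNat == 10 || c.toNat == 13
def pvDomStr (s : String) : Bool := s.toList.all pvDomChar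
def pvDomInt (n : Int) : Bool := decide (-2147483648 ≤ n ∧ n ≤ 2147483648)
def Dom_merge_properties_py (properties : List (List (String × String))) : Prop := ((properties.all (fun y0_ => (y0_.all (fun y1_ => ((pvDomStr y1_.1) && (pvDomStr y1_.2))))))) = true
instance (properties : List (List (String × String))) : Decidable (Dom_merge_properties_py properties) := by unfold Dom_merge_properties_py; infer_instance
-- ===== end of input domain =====

-- B replaces A's group-then-dedup two-phase merge by a single pass building a
-- nested dict (name -> val_key -> first prop) flattened at the end; objective: simpler.


-- ===== PORT A =====
-- prop.get(k, dflt) on the association-list dict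
def pvPropGetD (p : List (String × String)) (k dflt : String) : String :=
  (PySem.Dict.mk p).getD k dflt

-- f"{p.get('value','')}_{p.get('unit','')}" as its character list (exact: string concatenation)
def pvValKey (p : List (String × String)) : List Char :=
  (pvPropGetD p "value" "").toList ++ '_' :: (pvPropGetD p "unit" "").toList

def merge_properties_py (properties : List (List (String × String))) : List (List (String × String)) :=
  if properties = [] then []
  else
    let grouped : PySem.Dict String (List (List (String × String))) :=
      properties.foldl (fun g prop =>
        let name := pvPropGetD prop "name" "unknown"
        let g1 := if g.contains name then g else g.insert name []
        g1.insert name (g1.getD name [] ++ [prop])) PySem.Dict.empty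
    grouped.items.foldl (fun result np =>
      if np.2.length = 1 then
        result ++ [PySem.List.pyGetD np.2 0 []]
      else
        (np.2.foldl (fun (acc : List (List (String × String)) × PySem.Set (List Char)) p =>
          if PySem.Set.contains acc.2 (pvValKey p) then acc
          else (acc.1 ++ [p], PySem.Set.add acc.2 (pvValKey p))) (result, PySem.Set.empty)).1) []

-- ===== PORT B =====
def merge_properties_py_alt (properties : List (List (String × String))) : List (List (String × String)) :=
  let grouped : PySem.Dict String (PySem.Dict (List Char) (List (String × String))) :=
    properties.foldl (fun g prop =>
      let name := pvPropGetD prop "name" "unknown"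
      let inner := g.getD name PySem.Dict.empty
      g.insert name (inner.setdefault (pvValKey prop) prop)) PySem.Dict.empty
  grouped.items.flatMap (fun q => q.2.values)

-- ===== PRECONDITION & SPEC =====
def Spec_merge_properties_py (properties : List (List (String × String))) (out : List (List (String × String))) : Prop := out = merge_properties_py_alt properties
instance (properties : List (List (String × String))) (out : List (List (String × String))) : Decidable (Spec_merge_properties_py properties out) := by unfold Spec_merge_properties_py; infer_instance

-- ===== CLAIM (what is proved, stated in full; the proofs are below) =====
def Claim_equal_merge_properties_py : Prop := ∀ (properties : List (List (String × String))), Dom_merge_properties_py properties → Spec_merge_properties_py properties (merge_properties_py properties)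

-- ===== LEMMAS AND PROOFS =====

-- the per-group deduplicated dict: first prop for each val_key, in order
def pvDedupFirst (ps : List (List (String × String))) : PySem.Dict (List Char) (List (String × String)) :=
  ps.foldl (fun d p => d.setdefault (pvValKey p) p) PySem.Dict.empty

-- values of the running dedup dict only grow at the end
lemma pvValues_prefix (ps : List (List (String × String)))
    (d : PySem.Dict (List Char) (List (String × String))) :
    d.values <+: (ps.foldl (fun d p => d.setdefault (pvValKey p) p) d).values := by
  induction ps generalizing d with
  | nil => simp
  | cons p ps ih =>
    rw [List.foldl_cons]
    refine List.IsPrefix.trans ?_ (ih (d.setdefault (pvValKey p) p))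
    by_cases h : d.contains (pvValKey p) = true
    · rw [PySem.Dict.setdefault_of_contains d p h]
    · have h' : d.contains (pvValKey p) = false := by simpa using h
      rw [PySem.Dict.setdefault_of_not_contains d p h']
      rw [show (d.insert (pvValKey p) p).values = d.values ++ [p] from by
        simp [PySem.Dict.values, PySem.Dict.items_insert_of_not_contains d p h']]
      exact List.prefix_append _ _

-- A's inner dedup loop produces exactly the new values of the dedup dict
lemma pvChunk (ps : List (List (String × String)))
    (r : List (List (String × String))) (d : PySem.Dict (List Char) (List (String × String))) :
    ps.foldl (fun (acc : List (List (String × String)) × PySem.Set (List Char)) p =>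
        if PySem.Set.contains acc.2 (pvValKey p) then acc
        else (acc.1 ++ [p], PySem.Set.add acc.2 (pvValKey p))) (r, d.keys)
      = (r ++ ((ps.foldl (fun d p => d.setdefault (pvValKey p) p) d).values).drop d.values.length,
         (ps.foldl (fun d p => d.setdefault (pvValKey p) p) d).keys) := by
  induction ps generalizing r d with
  | nil => simp
  | cons p ps ih =>
    rw [List.foldl_cons, List.foldl_cons]
    by_cases h : d.contains (pvValKey p) = true
    · have hmem : pvValKey p ∈ d.keys := (PySem.Dict.contains_iff_mem_keys d _).1 h
      rw [PySem.Dict.setdefault_of_contains d p h]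
      simpa [hmem] using ih r d
    · have h' : d.contains (pvValKey p) = false := by simpa using h
      have hmem : pvValKey p ∉ d.keys := fun hm => h ((PySem.Dict.contains_iff_mem_keys d _).2 hm)
      rw [PySem.Dict.setdefault_of_not_contains d p h']
      have hkeys : PySem.Set.add d.keys (pvValKey p) = (d.insert (pvValKey p) p).keys := by
        rw [PySem.Set.add_of_not_mem hmem, PySem.Dict.keys_insert_of_not_contains d p h']
      have hvals : (d.insert (pvValKey p) p).values = d.values ++ [p] := by
        simp [PySem.Dict.values, PySem.Dict.items_insert_of_not_contains d p h']
      have hstep : (if PySem.Set.contains (d.keys) (pvValKey p) then (r, d.keys)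
          else (r ++ [p], PySem.Set.add d.keys (pvValKey p)))
          = (r ++ [p], (d.insert (pvValKey p) p).keys) := by
        rw [← hkeys]; simp [hmem]
      simp only [hstep]
      rw [ih (r ++ [p]) (d.insert (pvValKey p) p)]
      obtain ⟨t, ht⟩ := pvValues_prefix ps (d.insert (pvValKey p) p)
      have hd1 : (ps.foldl (fun d p => d.setdefault (pvValKey p) p)
          (d.insert (pvValKey p) p)).values.drop (d.insert (pvValKey p) p).values.length = t := by
        rw [← ht]; exact List.drop_left
      have hd2 : (ps.foldl (fun d p => d.setdefault (pvValKey p) p)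
          (d.insert (pvValKey p) p)).values.drop d.values.length = p :: t := by
        rw [← ht, hvals, List.append_assoc]
        exact List.drop_left
      rw [hd1, hd2]
      simp

-- one group's contribution in A's result loop = that group's dedup-dict values
lemma pvGroupStep (r : List (List (String × String))) (np : String × List (List (String × String))) :
    (if np.2.length = 1 then
        r ++ [PySem.List.pyGetD np.2 0 []]
      else
        (np.2.foldl (fun (acc : List (List (String × String)) × PySem.Set (List Char)) p =>
          if PySem.Set.contains acc.2 (pvValKey p) then acc
          else (acc.1 ++ [p], PySem.Set.add acc.2 (pvValKey p))) (r, PySem.Set.empty)).1)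
      = r ++ (pvDedupFirst np.2).values := by
  by_cases h : np.2.length = 1
  · obtain ⟨p, hp⟩ : ∃ p, np.2 = [p] := by
      match hv : np.2, h with
      | [p], _ => exact ⟨p, rfl⟩
    rw [if_pos h, hp]
    have hd : pvDedupFirst [p] = PySem.Dict.empty.insert (pvValKey p) p := by
      show PySem.Dict.empty.setdefault (pvValKey p) p = _
      exact PySem.Dict.setdefault_of_not_contains PySem.Dict.empty p rfl
    have hv : (PySem.Dict.empty.insert (pvValKey p) p).values = [p] := by
      show ((PySem.Dict.empty.insert (pvValKey p) p).items).map (·.2) = [p]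
      rw [PySem.Dict.items_insert_of_not_contains PySem.Dict.empty p rfl]
      rfl
    rw [hd, hv]
    rfl
  · rw [if_neg h]
    have hempty : (PySem.Set.empty : PySem.Set (List Char))
        = (PySem.Dict.empty : PySem.Dict (List Char) (List (String × String))).keys := rfl
    rw [hempty, pvChunk]
    simp [pvDedupFirst, show (PySem.Dict.empty : PySem.Dict (List Char) (List (String × String))).values = [] from rfl]

-- the grouping loops of A and B stay in lock step: B's dict is A's with each group deduplicated
lemma pvBuild (props : List (List (String × String))) :
    ∀ (gA : PySem.Dict String (List (List (String × String))))
      (gB : PySem.Dict String (PySem.Dict (List Char) (List (String × String)))),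
      gA.keys.Nodup →
      gB.items = gA.items.map (fun q => (q.1, pvDedupFirst q.2)) →
      (props.foldl (fun g prop =>
          let name := pvPropGetD prop "name" "unknown"
          let inner := g.getD name PySem.Dict.empty
          g.insert name (inner.setdefault (pvValKey prop) prop)) gB).items
        = (props.foldl (fun g prop =>
            let name := pvPropGetD prop "name" "unknown"
            let g1 := if g.contains name then g else g.insert name []
            g1.insert name (g1.getD name [] ++ [prop])) gA).items.map
              (fun q => (q.1, pvDedupFirst q.2)) := by
  induction props with
  | nil => intro gA gB _ h; simpa using h
  | cons prop props ih =>
    intro gA gB hnd hrel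
    rw [List.foldl_cons, List.foldl_cons]
    simp only []
    set n := pvPropGetD prop "name" "unknown" with hn
    have hkeysB : gB.keys = gA.keys := by
      show gB.items.map (·.1) = gA.items.map (·.1)
      rw [hrel, List.map_map]; rfl
    by_cases h : gA.contains n = true
    · -- name already grouped
      have hBc : gB.contains n = true := by
        rw [PySem.Dict.contains_eq_decide_mem_keys, hkeysB, ← PySem.Dict.contains_eq_decide_mem_keys]
        exact h
      obtain ⟨v, hg⟩ : ∃ v, gA.get? n = some v := by
        cases hgg : gA.get? n with
        | none => exact absurd ((PySem.Dict.get?_eq_none_iff_contains gA n).1 hgg) (by simp [h])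
        | some v => exact ⟨v, rfl⟩
      have hAgetD : gA.getD n [] = v := PySem.Dict.getD_of_get?_eq_some gA [] hg
      have hmemB : (n, pvDedupFirst v) ∈ gB.items := by
        rw [hrel]
        exact List.mem_map.2 ⟨(n, v), PySem.Dict.mem_items_of_get?_eq_some gA hg, rfl⟩
      have hndB : gB.keys.Nodup := by rw [hkeysB]; exact hnd
      have hBget : gB.getD n PySem.Dict.empty = pvDedupFirst v :=
        PySem.Dict.getD_of_mem_items gB hmemB hndB _
      rw [if_pos h, hAgetD, hBget]
      apply ih
      · rw [PySem.Dict.keys_insert_of_contains gA _ h]; exact hnd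
      · rw [PySem.Dict.items_insert_of_contains gB _ hBc,
          PySem.Dict.items_insert_of_contains gA _ h, hrel, List.map_map, List.map_map]
        apply List.map_congr_left
        intro q _
        by_cases hq : q.1 = n
        · simp only [Function.comp, hq, BEq.rfl, if_pos]
          have : pvDedupFirst (v ++ [prop]) = (pvDedupFirst v).setdefault (pvValKey prop) prop := by
            simp [pvDedupFirst, List.foldl_append]
          simp [this]
        · have hb : (q.1 == n) = false := by simp [hq]
          simp only [Function.comp_apply, hb, Bool.false_eq_true, if_false]
    · -- fresh name
      have h' : gA.contains n = false := by simpa using h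
      have hBc : gB.contains n = false := by
        rw [PySem.Dict.contains_eq_decide_mem_keys, hkeysB, ← PySem.Dict.contains_eq_decide_mem_keys]
        exact h'
      have hnmem : n ∉ gA.keys := fun hm => h ((PySem.Dict.contains_iff_mem_keys gA n).2 hm)
      have hBget : gB.getD n PySem.Dict.empty = PySem.Dict.empty :=
        PySem.Dict.getD_of_not_contains gB _ hBc
      rw [if_neg h, hBget]
      rw [show (gA.insert n []).getD n [] = [] from PySem.Dict.getD_insert_self gA n [] []]
      rw [PySem.Dict.insert_insert_self]
      apply ih
      · rw [PySem.Dict.keys_insert_of_not_contains gA _ h']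
        exact List.Nodup.append hnd (List.nodup_singleton n)
          (fun a ha hb => by simp at hb; subst hb; exact hnmem ha)
      · rw [PySem.Dict.items_insert_of_not_contains gB _ hBc,
          PySem.Dict.items_insert_of_not_contains gA _ h', hrel, List.map_append]
        rfl

-- A's result loop over the grouped items, rewritten group by group
lemma pvResult_eq (items : List (String × List (List (String × String))))
    (r : List (List (String × String))) :
    items.foldl (fun result np =>
        if np.2.length = 1 then
          result ++ [PySem.List.pyGetD np.2 0 []]
        else
          (np.2.foldl (fun (acc : List (List (String × String)) × PySem.Set (List Char)) p =>
            if PySem.Set.contains acc.2 (pvValKey p) then acc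
            else (acc.1 ++ [p], PySem.Set.add acc.2 (pvValKey p))) (result, PySem.Set.empty)).1) r
      = r ++ items.flatMap (fun np => (pvDedupFirst np.2).values) := by
  induction items generalizing r with
  | nil => simp
  | cons np items ih =>
    rw [List.foldl_cons, List.flatMap_cons, pvGroupStep, ih, List.append_assoc]

-- ===== VERDICT (by name: the statement is the Claim_ definition above) =====
theorem merge_properties_py_spec : Claim_equal_merge_properties_py := by
  unfold Claim_equal_merge_properties_py
  intro properties _hdom
  unfold Spec_merge_properties_py merge_properties_py merge_properties_py_alt
  by_cases h : properties = []
  · subst h; rfl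
  · rw [if_neg h]
    simp only []
    rw [pvResult_eq,
      pvBuild properties PySem.Dict.empty PySem.Dict.empty (by simp) rfl,
      List.flatMap_map]
    rfl
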